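-- pv_equiv track=rewrite | github.com/RideGreg/LeetCode | Python/5366.py | getDistanceMetrics
-- ===== SOURCE A (Python) =====
-- import bisect, collections
-- import collections
--
-- def getDistanceMetrics(a):
--     ans = [0] * len(a)
--     mapping = collections.defaultdict(list)
--     for i, v in enumerate(a):
--         mapping[v].append(i)
--     for _, lst in mapping.items():
--         for x in lst:
--             ans[x] = sum(abs(x-y) for y in lst)
--     return ans
-- ===== SOURCE B (Python) =====
-- def getDistanceMetrics(a):
--     ans = [0] * len(a)
--     groups = {}
--     for i, v in enumerate(a):
--         groups.setdefault(v, []).append(i)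
--     for lst in groups.values():
--         k = len(lst)
--         total = sum(lst)
--         left_cnt = 0
--         left_sum = 0
--         for x in lst:
--             ans[x] = (left_cnt * x - left_sum) + ((total - left_sum - x) - (k - left_cnt - 1) * x)
--             left_cnt += 1
--             left_sum += x
--     return ans
-- ===== Notes on version B (the rewrite author's own statement) =====
-- stated objective: faster
-- what changed: Instead of summing |x-y| over the whole index group for every element (quadratic per group), B makes one left-to-right pass per group maintaining a running count and running sum of indices already seen, computing each element's answer from the group's total sum in O(1).
import Mathlib
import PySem

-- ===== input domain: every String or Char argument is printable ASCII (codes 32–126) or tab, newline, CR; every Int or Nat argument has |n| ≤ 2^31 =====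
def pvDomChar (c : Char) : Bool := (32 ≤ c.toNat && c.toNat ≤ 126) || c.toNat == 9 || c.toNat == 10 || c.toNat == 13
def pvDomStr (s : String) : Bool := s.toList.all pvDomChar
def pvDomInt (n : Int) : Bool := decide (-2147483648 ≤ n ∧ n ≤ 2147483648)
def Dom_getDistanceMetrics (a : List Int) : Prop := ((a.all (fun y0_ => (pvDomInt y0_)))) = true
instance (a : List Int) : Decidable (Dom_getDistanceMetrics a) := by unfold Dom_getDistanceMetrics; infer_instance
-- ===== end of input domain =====

-- B replaces A's per-element rescan of each index group by one running-count/running-sum pass per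
-- group using the group's total (objective: faster, asymptotic).

-- ===== PORT A =====
def getDistanceMetrics (a : List Int) : List Int :=
  let ans := List.replicate a.length (0 : Int)
  let mapping := (PySem.List.enumerate a 0).foldl
    (fun d (p : Int × Int) => d.modify p.2 [] (fun l => l ++ [p.1])) PySem.Dict.empty
  mapping.items.foldl
    (fun ans pr => pr.2.foldl
      (fun ans x => PySem.List.pySetD ans x (pr.2.foldl (fun s y => s + |x - y|) 0)) ans)
    ans

-- ===== PORT B =====
def getDistanceMetrics_alt (a : List Int) : List Int :=
  let ans := List.replicate a.length (0 : Int)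
  let groups := (PySem.List.enumerate a 0).foldl
    (fun d (p : Int × Int) => d.modify p.2 [] (fun l => l ++ [p.1])) PySem.Dict.empty
  groups.values.foldl
    (fun ans lst =>
      let k : Int := lst.length
      let total : Int := lst.sum
      (lst.foldl
        (fun (st : List Int × Int × Int) x =>
          (PySem.List.pySetD st.1 x
            ((st.2.1 * x - st.2.2) + ((total - st.2.2 - x) - (k - st.2.1 - 1) * x)),
           (st.2.1 + 1, st.2.2 + x)))
        (ans, ((0 : Int), (0 : Int)))).1)
    ans

-- ===== PRECONDITION & SPEC =====
def Spec_getDistanceMetrics (a : List Int) (out : List Int) : Prop := out = getDistanceMetrics_alt a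
instance (a : List Int) (out : List Int) : Decidable (Spec_getDistanceMetrics a out) := by unfold Spec_getDistanceMetrics; infer_instance

-- ===== CLAIM (what is proved, stated in full; the proofs are below) =====
def Claim_equal_getDistanceMetrics : Prop := ∀ (a : List Int), Dom_getDistanceMetrics a → Spec_getDistanceMetrics a (getDistanceMetrics a)

-- ===== LEMMAS AND PROOFS =====

-- sum of |x - y| over a list of y's all ≤ x
lemma sum_abs_le (p : List Int) (x : Int) (h : ∀ y ∈ p, y ≤ x) :
    (p.map (fun y => |x - y|)).sum = p.length * x - p.sum := by
  induction p with
  | nil => simp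
  | cons a t ih =>
    have ha := h a (by simp)
    have habs : |x - a| = x - a := abs_of_nonneg (by omega)
    have := ih (fun y hy => h y (by simp [hy]))
    simp only [List.map_cons, List.sum_cons, habs, this, List.length_cons]
    push_cast; ring

-- sum of |x - y| over a list of y's all ≥ x
lemma sum_abs_ge (s : List Int) (x : Int) (h : ∀ y ∈ s, x ≤ y) :
    (s.map (fun y => |x - y|)).sum = s.sum - s.length * x := by
  induction s with
  | nil => simp
  | cons a t ih =>
    have ha := h a (by simp)
    have habs : |x - a| = -(x - a) := abs_of_nonpos (by omega)
    have := ih (fun y hy => h y (by simp [hy]))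
    simp only [List.map_cons, List.sum_cons, habs, this, List.length_cons]
    push_cast; ring

-- A's rescan value at x equals B's prefix-sum formula at x's position in the group
lemma value_eq (p t : List Int) (x : Int)
    (hp : ∀ y ∈ p, y ≤ x) (ht : ∀ y ∈ t, x ≤ y) :
    (p ++ x :: t).foldl (fun acc y => acc + |x - y|) 0
      = ((p.length : Int) * x - p.sum)
        + (((p ++ x :: t).sum - p.sum - x) - (((p ++ x :: t).length : Int) - p.length - 1) * x) := by
  rw [PySem.List.foldl_add (p ++ x :: t) (fun y => |x - y|) 0]
  simp only [List.map_append, List.map_cons, List.sum_append, List.sum_cons,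
    List.length_append, List.length_cons, sum_abs_le p x hp, sum_abs_ge t x ht,
    sub_self, abs_zero]
  push_cast; ring

-- per-group loop invariant: B's accumulator carries the length and sum of the processed prefix
lemma inner_eq (lst : List Int) (hlt : lst.Pairwise (· < ·)) :
    ∀ (s p : List Int), lst = p ++ s → ∀ (ans : List Int),
    s.foldl (fun ans x => PySem.List.pySetD ans x (lst.foldl (fun acc y => acc + |x - y|) 0)) ans
      = (s.foldl
          (fun (st : List Int × Int × Int) x =>
            (PySem.List.pySetD st.1 x
              ((st.2.1 * x - st.2.2) + ((lst.sum - st.2.2 - x) - ((lst.length : Int) - st.2.1 - 1) * x)),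
             (st.2.1 + 1, st.2.2 + x)))
          (ans, ((p.length : Int), p.sum))).1 := by
  intro s
  induction s with
  | nil => intro p h ans; simp
  | cons x t ih =>
    intro p h ans
    have hsplit : lst = (p ++ [x]) ++ t := by simp [h]
    have hpw := h ▸ hlt
    have hsplitpw := List.pairwise_append.mp hpw
    have hp : ∀ y ∈ p, y ≤ x := fun y hy => le_of_lt (hsplitpw.2.2 y hy x (by simp))
    have ht : ∀ y ∈ t, x ≤ y := fun y hy => le_of_lt ((List.pairwise_cons.mp hsplitpw.2.1).1 y hy)
    have hv : lst.foldl (fun acc y => acc + |x - y|) 0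
        = ((p.length : Int) * x - p.sum)
          + ((lst.sum - p.sum - x) - ((lst.length : Int) - (p.length : Int) - 1) * x) := by
      rw [h]; exact value_eq p t x hp ht
    simp only [List.foldl_cons, hv]
    rw [ih (p ++ [x]) hsplit (PySem.List.pySetD ans x _)]
    simp

-- the grouping fold's entry for key c: the indices i with a[i] = c, in order
lemma groups_getD (a : List Int) (c : Int) :
    ((PySem.List.enumerate a 0).foldl
      (fun d (p : Int × Int) => d.modify p.2 [] (fun l => l ++ [p.1])) PySem.Dict.empty).getD c []
    = ((((PySem.List.enumerate a 0).map (fun p => (p.2, p.1))).filter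
        (fun p => p.1 == c)).map (fun q => q.2)) := by
  have := PySem.Dict.getD_foldl_modify_append
    ((PySem.List.enumerate a 0).map (fun p => (p.2, p.1))) PySem.Dict.empty c
  rw [List.foldl_map] at this
  simpa using this

-- every group list is strictly increasing (enumerate indices are)
lemma groups_pairwise (a : List Int) (c : Int) :
    (((PySem.List.enumerate a 0).foldl
      (fun d (p : Int × Int) => d.modify p.2 [] (fun l => l ++ [p.1])) PySem.Dict.empty).getD c []).Pairwise (· < ·) := by
  rw [groups_getD]
  rw [List.pairwise_map]
  refine List.Pairwise.sublist List.filter_sublist ?_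
  rw [List.pairwise_map]
  exact PySem.List.pairwise_lt_enumerate a 0

lemma main_eq (a : List Int) : getDistanceMetrics a = getDistanceMetrics_alt a := by
  unfold getDistanceMetrics getDistanceMetrics_alt
  have hnd : (((PySem.List.enumerate a 0).foldl
      (fun d (p : Int × Int) => d.modify p.2 [] (fun l => l ++ [p.1])) PySem.Dict.empty)).keys.Nodup :=
    PySem.Dict.nodup_keys_foldl_modify_key (PySem.List.enumerate a 0) (fun p => p.2) []
      (fun _ p => (fun l => l ++ [p.1])) PySem.Dict.empty (by simp [PySem.Dict.keys_empty])
  simp only []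
  rw [PySem.Dict.items_eq_map_keys _ hnd [], PySem.Dict.values_eq_map_keys _ hnd []]
  rw [List.foldl_map, List.foldl_map]
  congr 1
  funext ans k
  simp only []
  have h := inner_eq _ (groups_pairwise a k)
    (((PySem.List.enumerate a 0).foldl
      (fun d (p : Int × Int) => d.modify p.2 [] (fun l => l ++ [p.1])) PySem.Dict.empty).getD k [])
    [] (by simp) ans
  simpa using h

-- ===== VERDICT (by name: the statement is the Claim_ definition above) =====
theorem getDistanceMetrics_spec : Claim_equal_getDistanceMetrics := by
  intro a _
  unfold Spec_getDistanceMetrics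
  exact main_eq a
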